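-- pv_equiv track=rewrite | github.com/shayleeque/pttechnologies | pttechnologies/modules/submodules/apache_server_status.py | _deduplicate_components
-- ===== SOURCE A (Python) =====
-- from typing import Dict, Any, List, Optional
--
-- def _deduplicate_components(components: List[Dict[str, Any]]) -> List[Dict[str, Any]]:
--     """
--     Deduplicate detected components, preferring header sources over footer.
--     Priority: header (most reliable) > footer (less reliable) > other sources
--
--     Args:
--         components: List of detected technology components
--
--     Returns:
--         Deduplicated list with priority handling
--     """
--     unique = {}
--     source_priority = {'header': 2, 'footer': 1}
--
--     for component in components:
--         tech_key = component['technology'].lower()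
--
--         if tech_key not in unique:
--             unique[tech_key] = component
--         else:
--             # Prefer higher priority sources
--             existing_priority = source_priority.get(unique[tech_key].get('source', ''), 0)
--             new_priority = source_priority.get(component.get('source', ''), 0)
--
--             if new_priority > existing_priority:
--                 unique[tech_key] = component
--             elif new_priority == existing_priority and component.get('version') and not unique[tech_key].get('version'):
--                 # Update with version if we have one and existing doesn't
--                 unique[tech_key] = component
--
--     return list(unique.values())
-- ===== SOURCE B (Python) =====
-- from typing import Dict, Any, List
--
--
-- def _deduplicate_components(components: List[Dict[str, Any]]) -> List[Dict[str, Any]]: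
--     """Group components by lowercased technology (first appearance fixes the
--     position), then pick each group's best entry: highest source priority,
--     then presence of a version, earliest seen on ties."""
--     source_priority = {'header': 2, 'footer': 1}
--     groups = {}
--     for component in components:
--         groups.setdefault(component['technology'].lower(), []).append(component)
--     return [
--         max(group, key=lambda c: (source_priority.get(c.get('source', ''), 0),
--                                   bool(c.get('version'))))
--         for group in groups.values()
--     ]
-- ===== Notes on version B (the rewrite author's own statement) =====
-- stated objective: simpler
-- what changed: Replaces the single incremental compare-and-replace dict pass with a two-phase shape: first group components by lowercased technology in first-appearance order, then select each group's winner with one max() over the key (source priority, has-version), relying on max returning the first maximal element to reproduce the tie-break.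
-- outside the precondition, e.g. on _deduplicate_components([{'source': 'header'}]): A raises KeyError, B raises KeyError
import Mathlib
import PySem

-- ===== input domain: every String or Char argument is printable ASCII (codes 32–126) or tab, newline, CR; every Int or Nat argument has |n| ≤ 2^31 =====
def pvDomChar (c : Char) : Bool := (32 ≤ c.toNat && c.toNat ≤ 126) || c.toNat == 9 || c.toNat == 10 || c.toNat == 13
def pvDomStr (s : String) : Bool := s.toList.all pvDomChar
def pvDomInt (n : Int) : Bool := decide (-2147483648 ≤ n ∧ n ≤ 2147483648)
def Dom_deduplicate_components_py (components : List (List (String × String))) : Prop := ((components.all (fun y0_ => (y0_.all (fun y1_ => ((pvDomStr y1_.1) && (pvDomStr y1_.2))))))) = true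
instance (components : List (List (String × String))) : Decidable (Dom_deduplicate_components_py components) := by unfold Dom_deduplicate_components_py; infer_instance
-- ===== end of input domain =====

-- B groups the components by lowercased technology and then takes each group's max
-- by (source priority, has-version) instead of A's incremental compare-and-replace pass;
-- equivalence is proved for the RETURN value (neither program mutates its argument).

-- shared dict primitives (a component dict is an association list; lookup = first match)
def pvGetOpt (c : List (String × String)) (k : String) : Option String :=
  (c.find? (fun p => p.1 == k)).map (·.2)

-- source_priority = {'header': 2, 'footer': 1}; source_priority.get(c.get('source',''), 0)
def srcPrio (c : List (String × String)) : Int :=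
  (PySem.Dict.ofList [("header", (2 : Int)), ("footer", 1)]).getD ((pvGetOpt c "source").getD "") 0

-- truthiness of c.get('version') : absent or empty string is falsy
def hasVer (c : List (String × String)) : Bool :=
  decide (((pvGetOpt c "version").getD "") ≠ "")

-- component['technology'].lower() ; the "" default is only reachable outside Pre_
def techKey (c : List (String × String)) : String :=
  PySem.Str.lower ((pvGetOpt c "technology").getD "")

-- ===== PORT A =====
def dedupStep (u : PySem.Dict String (List (String × String))) (c : List (String × String)) :
    PySem.Dict String (List (String × String)) :=
  match u.get? (techKey c) with
  | none => u.insert (techKey c) c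
  | some ex =>
    if srcPrio c > srcPrio ex then u.insert (techKey c) c
    else if srcPrio c = srcPrio ex ∧ hasVer c = true ∧ hasVer ex = false then u.insert (techKey c) c
    else u

def deduplicate_components_py (components : List (List (String × String))) : List (List (String × String)) :=
  (components.foldl dedupStep PySem.Dict.empty).values

-- ===== PORT B =====
-- groups.setdefault(component['technology'].lower(), []).append(component)
def groupStep (g : PySem.Dict String (List (List (String × String)))) (c : List (String × String)) :
    PySem.Dict String (List (List (String × String))) :=
  g.modify (techKey c) [] (· ++ [c])

-- max(group, key=lambda c: (source_priority.get(c.get('source',''),0), bool(c.get('version'))))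
def bestOf (grp : List (List (String × String))) : List (String × String) :=
  (PySem.List.max2? grp srcPrio hasVer).getD []

def deduplicate_components_py_alt (components : List (List (String × String))) : List (List (String × String)) :=
  ((components.foldl groupStep PySem.Dict.empty).values).map bestOf

-- ===== PRECONDITION & SPEC =====
-- Pre_ excludes exactly the inputs on which Python A raises KeyError: a component without a 'technology' key.
def Pre_deduplicate_components_py (components : List (List (String × String))) : Prop :=
  ∀ c ∈ components, (c.find? (fun p => p.1 == "technology")).isSome = true
instance (components : List (List (String × String))) : Decidable (Pre_deduplicate_components_py components) := by unfold Pre_deduplicate_components_py; infer_instance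

def pvWitness_deduplicate_components_py : (List (List (String × String))) :=
  [[("technology", "PHP"), ("source", "footer")],
   [("technology", "php"), ("source", "header"), ("version", "8.0")]]

def Spec_deduplicate_components_py (components : List (List (String × String))) (out : List (List (String × String))) : Prop := out = deduplicate_components_py_alt components
instance (components : List (List (String × String))) (out : List (List (String × String))) : Decidable (Spec_deduplicate_components_py components out) := by unfold Spec_deduplicate_components_py; infer_instance

-- ===== CLAIM (what is proved, stated in full; the proofs are below) =====
def Claim_equal_deduplicate_components_py : Prop := ∀ (components : List (List (String × String))), Dom_deduplicate_components_py components → Pre_deduplicate_components_py components → Spec_deduplicate_components_py components (deduplicate_components_py components)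

-- ===== LEMMAS AND PROOFS =====

-- Python max's acceptance test on the tuple key, as the max2? fold uses it
def mcond (m c : List (String × String)) : Bool :=
  decide (srcPrio m < srcPrio c) || (!decide (srcPrio c < srcPrio m) && decide (hasVer m < hasVer c))

-- the running best of a group, as Python's max visits it
def pick (m x : List (String × String)) : List (String × String) :=
  if mcond m x then x else m

-- the value-wise view of a groups entry
def mpEnt (p : String × List (List (String × String))) : String × List (String × String) :=
  (p.1, bestOf p.2)

lemma foldl_opt (f : Option (List (String × String)) → List (String × String) → Option (List (String × String)))
    (g : List (String × String) → List (String × String) → List (String × String))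
    (h2 : ∀ m x, f (some m) x = some (g m x)) :
    ∀ (t : List (List (String × String))) (m), List.foldl f (some m) t = some (List.foldl g m t) := by
  intro t
  induction t with
  | nil => intro m; rfl
  | cons x t ih =>
    intro m
    rw [List.foldl_cons, List.foldl_cons, h2]
    exact ih (g m x)

lemma max2?_cons (x : List (String × String)) (t : List (List (String × String))) :
    PySem.List.max2? (x :: t) srcPrio hasVer = some (t.foldl pick x) := by
  show List.foldl _ none (x :: t) = _
  rw [List.foldl_cons]
  refine foldl_opt _ pick ?_ t x
  intro m y
  show (if (decide (srcPrio m < srcPrio y) || (!decide (srcPrio y < srcPrio m) && decide (hasVer m < hasVer y))) = true then some y else some m) = some (pick m y)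
  unfold pick
  by_cases hc : mcond m y = true
  · have hc' : (decide (srcPrio m < srcPrio y) || (!decide (srcPrio y < srcPrio m) && decide (hasVer m < hasVer y))) = true := hc
    rw [if_pos hc', if_pos hc]
  · have hc' : ¬ ((decide (srcPrio m < srcPrio y) || (!decide (srcPrio y < srcPrio m) && decide (hasVer m < hasVer y))) = true) := hc
    rw [if_neg hc', if_neg hc]

lemma bestOf_cons (x : List (String × String)) (t : List (List (String × String))) :
    bestOf (x :: t) = t.foldl pick x := by
  rw [bestOf, max2?_cons]; rfl

lemma bestOf_singleton (c : List (String × String)) : bestOf [c] = c := rfl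

lemma bestOf_snoc (grp : List (List (String × String))) (c : List (String × String)) (h : grp ≠ []) :
    bestOf (grp ++ [c]) = if mcond (bestOf grp) c then c else bestOf grp := by
  match grp, h with
  | x :: t, _ =>
    rw [List.cons_append, bestOf_cons, bestOf_cons, List.foldl_append]
    simp only [List.foldl_cons, List.foldl_nil, pick]

-- A's two replace branches fire exactly when the max2? fold accepts the newcomer
lemma mcond_iff (ex c : List (String × String)) :
    mcond ex c = true ↔
      (srcPrio c > srcPrio ex ∨ (srcPrio c = srcPrio ex ∧ hasVer c = true ∧ hasVer ex = false)) := by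
  unfold mcond
  cases hc : hasVer c <;> cases he : hasVer ex <;>
    · simp [Bool.lt_iff]
      try omega

lemma get?_corr (u : PySem.Dict String (List (String × String)))
    (g : PySem.Dict String (List (List (String × String))))
    (h : u.items = g.items.map mpEnt) (k : String) :
    u.get? k = (g.get? k).map bestOf := by
  show ((u.items.find? (fun p => p.1 == k)).map (·.2)) = _
  rw [h, List.find?_map]
  show ((g.items.find? ((fun p => p.1 == k) ∘ mpEnt)).map mpEnt).map (·.2) = _
  have : ((fun (p : String × List (String × String)) => p.1 == k) ∘ mpEnt) =
      (fun (p : String × List (List (String × String))) => p.1 == k) := rfl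
  rw [this]
  show _ = (((g.items.find? _)).map (·.2)).map bestOf
  cases g.items.find? (fun p => p.1 == k) <;> rfl

-- the unique entry at key k holds the value get? returns
lemma entry_eq_of_mem (g : PySem.Dict String (List (List (String × String))))
    (hn : g.keys.Nodup) {p : String × List (List (String × String))} (hp : p ∈ g.items)
    {k : String} {gr : List (List (String × String))} (hk : p.1 = k) (hg : g.get? k = some gr) :
    p = (k, gr) := by
  have h1 : g.get? p.1 = some p.2 := PySem.Dict.get?_of_mem_items g hp hn
  rw [hk, hg] at h1
  have : p.2 = gr := by injection h1.symm
  cases p; simp_all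

lemma keys_corr (u : PySem.Dict String (List (String × String)))
    (g : PySem.Dict String (List (List (String × String))))
    (h : u.items = g.items.map mpEnt) : u.keys = g.keys := by
  show u.items.map (·.1) = g.items.map (·.1)
  rw [h, List.map_map]; rfl

-- (d.insert k v) = d item-wise, when d already maps k to v and keys are unique
-- main invariant: A's dict is the entry-wise best of B's groups, all along the fold
lemma fold_inv (cs : List (List (String × String))) :
    ∀ (u : PySem.Dict String (List (String × String)))
      (g : PySem.Dict String (List (List (String × String)))),
      u.items = g.items.map mpEnt → g.keys.Nodup → (∀ p ∈ g.items, p.2 ≠ []) →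
      (cs.foldl dedupStep u).items = (cs.foldl groupStep g).items.map mpEnt := by
  induction cs with
  | nil => intro u g h _ _; simpa using h
  | cons c cs ih =>
    intro u g h hn hne
    simp only [List.foldl_cons]
    have hun : u.keys.Nodup := by rw [keys_corr u g h]; exact hn
    have hgq := get?_corr u g h (techKey c)
    -- the stepped dicts still satisfy the invariant
    have hn' : (groupStep g c).keys.Nodup := by
      unfold groupStep PySem.Dict.modify
      exact PySem.Dict.nodup_keys_insert _ _ _ hn
    have hne' : ∀ p ∈ (groupStep g c).items, p.2 ≠ [] := by
      unfold groupStep PySem.Dict.modify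
      intro p hp
      by_cases hc : g.contains (techKey c) = true
      · rw [PySem.Dict.items_insert_of_contains _ _ hc] at hp
        obtain ⟨q, hq, hqe⟩ := List.mem_map.mp hp
        by_cases hk : (q.1 == techKey c) = true
        · rw [if_pos hk] at hqe; subst hqe; simp
        · rw [if_neg hk] at hqe; subst hqe; exact hne q hq
      · rw [PySem.Dict.items_insert_of_not_contains _ _ (by simpa using hc)] at hp
        rcases List.mem_append.mp hp with hp | hp
        · exact hne p hp
        · simp at hp; subst hp; simp
    apply ih _ _ _ hn' hne'
    -- one step preserves the item-map relation
    cases hq : g.get? (techKey c) with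
    | none =>
      have hgc : g.contains (techKey c) = false := by
        rw [PySem.Dict.contains_eq_isSome_get?, hq]; rfl
      have huq : u.get? (techKey c) = none := by rw [hgq, hq]; rfl
      have huc : u.contains (techKey c) = false := by
        rw [PySem.Dict.contains_eq_isSome_get?, huq]; rfl
      unfold dedupStep groupStep PySem.Dict.modify
      simp only [huq]
      rw [PySem.Dict.items_insert_of_not_contains _ _ huc,
        PySem.Dict.getD_of_not_contains _ _ hgc,
        PySem.Dict.items_insert_of_not_contains _ _ hgc]
      simp [h, mpEnt, bestOf_singleton]
    | some gr =>
      have hgrne : gr ≠ [] := by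
        have : (techKey c, gr) ∈ g.items := PySem.Dict.mem_items_of_get?_eq_some g hq
        exact hne _ this
      have hgc : g.contains (techKey c) = true := by
        rw [PySem.Dict.contains_eq_isSome_get?, hq]; rfl
      have huq : u.get? (techKey c) = some (bestOf gr) := by rw [hgq, hq]; rfl
      have huc : u.contains (techKey c) = true := by
        rw [PySem.Dict.contains_eq_isSome_get?, huq]; rfl
      have hbsnoc := bestOf_snoc gr c hgrne
      have hB : (groupStep g c).items =
          g.items.map (fun p => if (p.1 == techKey c) = true then (techKey c, gr ++ [c]) else p) := by
        unfold groupStep PySem.Dict.modify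
        rw [PySem.Dict.getD_of_get?_eq_some g _ hq, PySem.Dict.items_insert_of_contains _ _ hgc]
      -- goal for each A-branch: items = g.items.map (entry-wise stepped mpEnt)
      have hmapB : (groupStep g c).items.map mpEnt =
          g.items.map (fun p => if (p.1 == techKey c) = true
            then (techKey c, bestOf (gr ++ [c])) else mpEnt p) := by
        rw [hB, List.map_map]
        apply List.map_congr_left
        intro p _
        show mpEnt (if (p.1 == techKey c) = true then (techKey c, gr ++ [c]) else p) =
          if (p.1 == techKey c) = true then (techKey c, bestOf (gr ++ [c])) else mpEnt p
        by_cases hk : (p.1 == techKey c) = true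
        · rw [if_pos hk, if_pos hk]; rfl
        · rw [if_neg hk, if_neg hk]
      unfold dedupStep
      simp only [huq]
      rw [hmapB]
      by_cases hcd : mcond (bestOf gr) c = true
      · -- newcomer accepted: both of A's replace branches insert c
        have hval : bestOf (gr ++ [c]) = c := by rw [hbsnoc, if_pos hcd]
        have hins : (u.insert (techKey c) c).items =
            g.items.map (fun p => if (p.1 == techKey c) = true
              then (techKey c, c) else mpEnt p) := by
          rw [PySem.Dict.items_insert_of_contains _ _ huc, h, List.map_map]
          apply List.map_congr_left
          intro p _
          show (if ((mpEnt p).1 == techKey c) = true then (techKey c, c) else mpEnt p) =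
            if (p.1 == techKey c) = true then (techKey c, c) else mpEnt p
          by_cases hk : (p.1 == techKey c) = true
          · have hk' : ((mpEnt p).1 == techKey c) = true := hk
            rw [if_pos hk', if_pos hk]
          · have hk' : ¬ ((mpEnt p).1 == techKey c) = true := hk
            rw [if_neg hk', if_neg hk]
        rcases (mcond_iff (bestOf gr) c).mp hcd with hgt | heqv
        · simp only [if_pos hgt, hins, hval]
        · by_cases hgt : srcPrio c > srcPrio (bestOf gr)
          · simp only [if_pos hgt, hins, hval]
          · simp only [if_neg hgt, if_pos heqv, hins, hval]
      · -- newcomer rejected: A keeps u, and the group's best is unchanged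
        have hval : bestOf (gr ++ [c]) = bestOf gr := by rw [hbsnoc, if_neg hcd]
        have hgt : ¬ srcPrio c > srcPrio (bestOf gr) := by
          intro hg; exact hcd ((mcond_iff _ _).mpr (Or.inl hg))
        have heqv : ¬ (srcPrio c = srcPrio (bestOf gr) ∧ hasVer c = true ∧ hasVer (bestOf gr) = false) := by
          intro hg; exact hcd ((mcond_iff _ _).mpr (Or.inr hg))
        simp only [if_neg hgt, if_neg heqv]
        rw [h]
        apply List.map_congr_left
        intro p hp
        by_cases hk : (p.1 == techKey c) = true
        · have hpk : p.1 = techKey c := by simpa using hk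
          have hpe : p = (techKey c, gr) := entry_eq_of_mem g hn hp hpk hq
          rw [if_pos hk, hpe, hval]; rfl
        · rw [if_neg hk]

-- ===== VERDICT (by name: the statement is the Claim_ definition above) =====
theorem deduplicate_components_py_spec : Claim_equal_deduplicate_components_py := by
  intro components _ _
  show deduplicate_components_py components = deduplicate_components_py_alt components
  unfold deduplicate_components_py deduplicate_components_py_alt
  have h := fold_inv components PySem.Dict.empty PySem.Dict.empty rfl (by simp) (by simp [PySem.Dict.empty])
  show (components.foldl dedupStep PySem.Dict.empty).items.map (·.2) =
    ((components.foldl groupStep PySem.Dict.empty).items.map (·.2)).map bestOf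
  rw [h, List.map_map, List.map_map]
  rfl
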